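-- pv_equiv track=rewrite | github.com/Lexa2805/summer-practice-hackathon-2026 | showup2move/backend/app/services/ai_service.py | _normalize_sports
-- ===== SOURCE A (Python) =====
-- from typing import Any
--
-- SUPPORTED_SPORTS = ["Football", "Tennis", "Basketball", "Running", "Volleyball"]
--
-- def _normalize_sports(values: Any) -> list[str]:
--     if not isinstance(values, list):
--         return []
--     allowed = {sport.lower(): sport for sport in SUPPORTED_SPORTS}
--     normalized = []
--     for value in values:
--         sport = allowed.get(str(value).strip().lower())
--         if sport and sport not in normalized:
--             normalized.append(sport)
--     return normalized
-- ===== SOURCE B (Python) =====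
-- from typing import Any
--
-- SUPPORTED_SPORTS = ["Football", "Tennis", "Basketball", "Running", "Volleyball"]
--
-- def _normalize_sports(values: Any) -> list[str]:
--     if not isinstance(values, list):
--         return []
--     allowed = {sport.lower(): sport for sport in SUPPORTED_SPORTS}
--
--     def emit(keys: list) -> list:
--         # scan for the first supported key, emit its canonical name,
--         # then recurse on the remainder purged of that key
--         for i, k in enumerate(keys):
--             sport = allowed.get(k)
--             if sport is not None:
--                 return [sport] + emit([x for x in keys[i + 1:] if x != k])
--         return []
--
--     return emit([str(v).strip().lower() for v in values])
-- ===== Notes on version B (the rewrite author's own statement) =====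
-- stated objective: alternative
-- what changed: Instead of one pass that appends after scanning the output for membership, B repeatedly scans the key worklist for the first supported key, emits its canonical name, and recurses on the remainder purged of that key, so no seen-set/membership test on the output exists.
import Mathlib
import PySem

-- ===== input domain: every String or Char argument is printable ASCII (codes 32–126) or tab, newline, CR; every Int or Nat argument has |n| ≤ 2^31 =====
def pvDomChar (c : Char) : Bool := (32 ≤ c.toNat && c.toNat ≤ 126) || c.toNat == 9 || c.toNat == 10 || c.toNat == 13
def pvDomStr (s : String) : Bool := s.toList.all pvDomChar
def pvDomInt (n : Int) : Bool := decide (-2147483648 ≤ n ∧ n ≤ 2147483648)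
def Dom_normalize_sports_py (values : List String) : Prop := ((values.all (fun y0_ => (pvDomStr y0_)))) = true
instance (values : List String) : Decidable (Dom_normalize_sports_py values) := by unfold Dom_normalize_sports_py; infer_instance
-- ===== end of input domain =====

-- B replaces A's append-after-membership-scan loop by emit-and-purge recursion over a key worklist; alternative, not faster.

-- ===== PORT A =====
-- module constant SUPPORTED_SPORTS
def pvSupportedSports : List String := ["Football", "Tennis", "Basketball", "Running", "Volleyball"]

-- allowed = {sport.lower(): sport for sport in SUPPORTED_SPORTS}  (identical line in A and B)
def pvAllowed : PySem.Dict String String :=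
  pvSupportedSports.foldl (fun d sport => d.insert (PySem.Str.lower sport) sport) PySem.Dict.empty

-- literal port of A's loop: look up, then append when the result is truthy and not yet collected
def normalize_sports_py (values : List String) : List String :=
  values.foldl
    (fun normalized value =>
      match pvAllowed.get? (PySem.Str.lower (PySem.Str.strip value)) with
      | none => normalized                                   -- sport is None: falsy, skip
      | some sport =>
          if sport ≠ "" ∧ sport ∉ normalized                 -- "if sport and sport not in normalized"
          then normalized ++ [sport] else normalized)
    []

-- ===== PORT B =====
-- B's emit(keys): scan for the first supported key (the for loop = the recursion through
-- unsupported heads), emit allowed[k], recurse on the tail purged of that key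
def pvEmit : List String → List String
  | [] => []
  | k :: tail =>
    match pvAllowed.get? k with
    | some sport => sport :: pvEmit (tail.filter (fun x => x ≠ k))
    | none => pvEmit tail
termination_by keys => keys.length
decreasing_by
  · exact Nat.lt_succ_of_le (by simpa using List.length_filter_le _ tail.attach)
  · exact Nat.lt_succ_self _

-- return emit([str(v).strip().lower() for v in values])
def normalize_sports_py_alt (values : List String) : List String :=
  pvEmit (values.map (fun v => PySem.Str.lower (PySem.Str.strip v)))

-- ===== PRECONDITION & SPEC =====
def Spec_normalize_sports_py (values : List String) (out : List String) : Prop := out = normalize_sports_py_alt values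
instance (values : List String) (out : List String) : Decidable (Spec_normalize_sports_py values out) := by unfold Spec_normalize_sports_py; infer_instance

-- ===== CLAIM (what is proved, stated in full; the proofs are below) =====
def Claim_equal_normalize_sports_py : Prop := ∀ (values : List String), Dom_normalize_sports_py values → Spec_normalize_sports_py values (normalize_sports_py values)

-- ===== LEMMAS AND PROOFS =====

lemma pvAllowed_eq :
    pvAllowed = PySem.Dict.mk [("football", "Football"), ("tennis", "Tennis"),
      ("basketball", "Basketball"), ("running", "Running"), ("volleyball", "Volleyball")] := by
  decide

-- every value stored in the allowed dict is a nonempty (truthy) canonical name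
lemma pvAllowed_some_ne (k s : String) (h : pvAllowed.get? k = some s) : s ≠ "" := by
  rw [pvAllowed_eq] at h
  simp [PySem.Dict.get?_mk_cons] at h
  split_ifs at h
  all_goals first
    | (cases h; decide)
    | simp [PySem.Dict.get?] at h

-- the allowed dict is injective on values: the key producing a given canonical name is unique
lemma pvAllowed_inj (x k s : String)
    (hx : pvAllowed.get? x = some s) (hk : pvAllowed.get? k = some s) : x = k := by
  rw [pvAllowed_eq] at hx hk
  simp [PySem.Dict.get?_mk_cons] at hx hk
  split_ifs at hx hk
  all_goals first
    | (exact absurd (hx.trans hk.symm) (by decide))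
    | (subst_vars <;> simp_all [PySem.Dict.get?])

-- A's loop from any accumulator is Set.update by the mapped hits
lemma loopA_eq_update (d : PySem.Dict String String)
    (hd : ∀ k s, d.get? k = some s → s ≠ "") (l : List String) (acc : List String) :
    l.foldl
      (fun normalized value =>
        match d.get? (PySem.Str.lower (PySem.Str.strip value)) with
        | none => normalized
        | some sport =>
            if sport ≠ "" ∧ sport ∉ normalized
            then normalized ++ [sport] else normalized)
      acc
    = PySem.Set.update acc
        ((l.map (fun value => PySem.Str.lower (PySem.Str.strip value))).filterMap
          (fun k => d.get? k)) := by
  induction l generalizing acc with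
  | nil => simp [PySem.Set.update]
  | cons v vs ih =>
    cases h : d.get? (PySem.Str.lower (PySem.Str.strip v)) with
    | none => simp [h, ih]
    | some s =>
      have hne := hd _ _ h
      by_cases hmem : s ∈ acc <;>
        simp [h, hne, hmem, ih, PySem.Set.update, PySem.Set.add, PySem.Set.contains]

-- predicate describing the keys B's emit still has to consider given what is already collected
def pvLive (acc : List String) (x : String) : Bool :=
  match pvAllowed.get? x with
  | some s => decide (s ∉ acc)
  | none => true

-- Set.update by the mapped hits = emit on the worklist of still-live keys
lemma update_eq_emit (keys acc : List String) :
    PySem.Set.update acc (keys.filterMap (fun k => pvAllowed.get? k))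
      = acc ++ pvEmit (keys.filter (pvLive acc)) := by
  induction keys generalizing acc with
  | nil => simp [PySem.Set.update, pvEmit]
  | cons k tail ih =>
    cases h : pvAllowed.get? k with
    | none =>
      have hlive : pvLive acc k = true := by simp [pvLive, h]
      simp only [List.filterMap_cons, h, List.filter_cons, hlive, if_true, pvEmit, h]
      exact ih acc
    | some s =>
      by_cases hmem : s ∈ acc
      · have hlive : pvLive acc k = false := by simp [pvLive, h, hmem]
        have : PySem.Set.update acc (s :: tail.filterMap (fun k => pvAllowed.get? k))
            = PySem.Set.update acc (tail.filterMap (fun k => pvAllowed.get? k)) := by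
          simp [PySem.Set.update, PySem.Set.add, PySem.Set.contains, hmem]
        rw [List.filterMap_cons, h, this, ih acc]
        simp [List.filter_cons, hlive]
      · have hlive : pvLive acc k = true := by simp [pvLive, h, hmem]
        simp only [List.filterMap_cons, h, List.filter_cons, hlive, if_true]
        have hstep : PySem.Set.update acc (s :: tail.filterMap (fun k => pvAllowed.get? k))
            = PySem.Set.update (acc ++ [s]) (tail.filterMap (fun k => pvAllowed.get? k)) := by
          simp [PySem.Set.update, PySem.Set.add, PySem.Set.contains, hmem]
        rw [hstep, ih (acc ++ [s])]
        rw [pvEmit]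
        simp only [h, List.append_assoc, List.singleton_append]
        congr 2
        congr 1
        rw [List.filter_filter]
        -- purging k from the live-for-acc keys = the keys live for acc ++ [s]
        apply List.filter_congr
        intro x _
        cases hg : pvAllowed.get? x with
        | none =>
          have hxk : x ≠ k := by intro e; rw [e, h] at hg; cases hg
          simp [pvLive, hg, hxk]
        | some t =>
          by_cases hts : t = s
          · subst hts
            have : x = k := pvAllowed_inj x k t hg h
            simp [pvLive, hg, this, h]
          · have hxk : x ≠ k := by
              intro e; rw [e, h] at hg; exact hts (by cases hg; rfl)
            simp [pvLive, hg, hxk, hts]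

-- ===== VERDICT (by name: the statement is the Claim_ definition above) =====
theorem normalize_sports_py_spec : Claim_equal_normalize_sports_py := by
  intro values _
  simp only [Spec_normalize_sports_py, normalize_sports_py, normalize_sports_py_alt]
  rw [loopA_eq_update pvAllowed pvAllowed_some_ne, update_eq_emit]
  have hall : ∀ x ∈ values.map (fun v => PySem.Str.lower (PySem.Str.strip v)),
      pvLive [] x = true := by
    intro x _
    unfold pvLive
    cases pvAllowed.get? x <;> simp
  rw [List.filter_congr (q := fun _ => true) (by simpa using hall), List.filter_true,
    List.nil_append]
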